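-- pv_equiv track=rewrite | github.com/VITA-Group/21LPCV-UAV-Solution | submission/solution/modules/improved_action_detector.py | format_writing
-- ===== SOURCE A (Python) =====
-- import math
--
-- def format_writing(catch_bp_assoc_history, ball_order):
--     records = []
--     latest_bp_assoc_dct = {}
--     for bid, time_pid_pairs in catch_bp_assoc_history.items():
--         latest_bp_assoc_dct[bid] = time_pid_pairs[0][1]
--         for time, pid in time_pid_pairs:
--             records.append((time, bid, pid))
--
--     sorted_records = sorted(records, key=lambda foo:foo[0])
--
--     outcome = []
--     for i, record in enumerate(sorted_records):
--         time, bid, pid = record[0], record[1], record[2]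
--         latest_bp_assoc_dct[bid] = pid
--         if i + 1 == len(sorted_records):
--             next_time = math.inf
--         else:
--             next_time = sorted_records[i+1][0]
--         if time < next_time:
--             pids = [latest_bp_assoc_dct[b] for b in ball_order]
--             outcome.append([sorted_records[i][0]] + pids )
--     return outcome
-- ===== SOURCE B (Python) =====
-- def format_writing(catch_bp_assoc_history, ball_order):
--     # one snapshot per distinct event time, computed per (time, ball) by scanning
--     # that ball's own pair list for its most recent update (time <= t, later-listed
--     # pair wins ties), falling back to the first-listed pid as the seed
--     times = sorted({t for pairs in catch_bp_assoc_history.values() for t, _ in pairs})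
--     outcome = []
--     for t in times:
--         row = [t]
--         for b in ball_order:
--             pairs = catch_bp_assoc_history[b]
--             best = None
--             for pt, pid in pairs:
--                 if pt <= t and (best is None or best[0] <= pt):
--                     best = (pt, pid)
--             row.append(pairs[0][1] if best is None else best[1])
--         outcome.append(row)
--     return outcome
-- ===== Notes on version B (the rewrite author's own statement) =====
-- stated objective: alternative
-- what changed: A flattens every (time,bid,pid) record, sorts all of them, and scans the sorted list once while mutating a latest-association dict, emitting a row at each run boundary; B never builds or sorts the record list and keeps no running state: it sorts only the set of distinct times and computes every snapshot cell independently by scanning that one ball's own pair list for its most recent update (time <= t, later-listed pair wins ties), falling back to the first-listed pid. Pre_ excludes inputs where A raises (an empty per-ball pair list: IndexError; …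
import Mathlib
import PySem

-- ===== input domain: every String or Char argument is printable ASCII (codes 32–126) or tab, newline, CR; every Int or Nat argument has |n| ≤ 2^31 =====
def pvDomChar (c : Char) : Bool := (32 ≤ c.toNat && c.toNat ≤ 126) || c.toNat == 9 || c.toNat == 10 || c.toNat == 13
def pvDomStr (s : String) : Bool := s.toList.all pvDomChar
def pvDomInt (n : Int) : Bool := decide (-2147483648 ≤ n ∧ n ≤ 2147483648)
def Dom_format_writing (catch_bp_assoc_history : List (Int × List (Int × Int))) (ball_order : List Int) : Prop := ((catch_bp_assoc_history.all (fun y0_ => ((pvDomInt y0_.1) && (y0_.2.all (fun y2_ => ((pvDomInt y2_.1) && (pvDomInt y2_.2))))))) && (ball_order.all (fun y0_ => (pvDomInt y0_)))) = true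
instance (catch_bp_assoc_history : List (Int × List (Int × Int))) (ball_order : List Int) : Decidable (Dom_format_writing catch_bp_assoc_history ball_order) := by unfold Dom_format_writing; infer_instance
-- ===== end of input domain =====

-- B drops A's sort-all-records-then-scan-with-a-mutable-dict strategy: it computes each snapshot
-- cell independently, scanning only that ball's own pair list for its most recent update
-- (no global record sort, no running association dict); alternative decomposition, not faster.

-- ===== PORT A =====
-- A's main loop: latest[bid] = pid each step; emit a snapshot when the NEXT record's time is
-- strictly larger (math.inf, i.e. always, at the last record).
def fwLoopA (bo : List Int) (d : PySem.Dict Int Int) : List (Int × Int × Int) → List (List Int)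
  | [] => []
  | r :: rest =>
    let d' := d.insert r.2.1 r.2.2
    let emit : Bool := match rest with
      | [] => true                       -- next_time = math.inf: time < inf always
      | r2 :: _ => decide (r.1 < r2.1)
    (if emit then [[r.1] ++ bo.map (fun b => d'.getD b 0)] else []) ++ fwLoopA bo d' rest
    -- latest[b] raises KeyError when b is absent; Pre_ excludes that, getD 0 is the total stand-in

def format_writing (catch_bp_assoc_history : List (Int × List (Int × Int))) (ball_order : List Int) : List (List Int) :=
  -- one loop building (records, latest_bp_assoc_dct); time_pid_pairs[0][1] raises IndexError on
  -- an empty pair list — excluded by Pre_, 0 is the total stand-in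
  let st := catch_bp_assoc_history.foldl
    (fun (st : List (Int × Int × Int) × PySem.Dict Int Int) p =>
      (p.2.foldl (fun recs q => recs ++ [(q.1, p.1, q.2)]) st.1,
       st.2.insert p.1 (match p.2 with | [] => 0 | q :: _ => q.2)))
    ([], PySem.Dict.empty)
  let sorted_records := PySem.List.sorted st.1 (fun r => r.1) false
  fwLoopA ball_order st.2 sorted_records

-- ===== PORT B =====
-- 'best = None; for pt, pid in pairs: if pt <= t and (best is None or best[0] <= pt): best = (pt, pid)'
def fwBest (t : Int) (pairs : List (Int × Int)) : Option (Int × Int) :=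
  pairs.foldl
    (fun best q =>
      if (decide (q.1 ≤ t) && (match best with | none => true | some bq => decide (bq.1 ≤ q.1))) = true
      then some q else best)
    none

def format_writing_alt (catch_bp_assoc_history : List (Int × List (Int × Int))) (ball_order : List Int) : List (List Int) :=
  -- times = sorted({t for pairs in values for t, _ in pairs})
  let times := PySem.List.sorted (PySem.Set.ofList (catch_bp_assoc_history.flatMap (fun p => p.2.map (fun q => q.1)))) (fun x => x) false
  times.map (fun t =>
    t :: ball_order.map (fun b =>
      -- pairs = catch_bp_assoc_history[b]: KeyError when b absent — excluded by Pre_, [] stand-in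
      let pairs := PySem.Dict.getD (PySem.Dict.mk catch_bp_assoc_history) b []
      match fwBest t pairs with
      | some q => q.2
      -- pairs[0][1] raises IndexError on an empty pair list — excluded by Pre_, 0 stand-in
      | none => match pairs with | q :: _ => q.2 | [] => 0))

-- ===== PRECONDITION & SPEC =====
-- Pre_ excludes exactly the inputs where the Python A raises (an empty per-ball pair list:
-- IndexError; a ball_order id missing from a nonempty history: KeyError) and association lists
-- with duplicate ball ids, which a Python dict argument collapses (last value wins) so the
-- insertion-ordered list cannot faithfully represent them.
def Pre_format_writing (catch_bp_assoc_history : List (Int × List (Int × Int))) (ball_order : List Int) : Prop :=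
  (catch_bp_assoc_history.map Prod.fst).Nodup ∧
  (∀ p ∈ catch_bp_assoc_history, p.2 ≠ []) ∧
  (catch_bp_assoc_history = [] ∨ ∀ b ∈ ball_order, b ∈ catch_bp_assoc_history.map Prod.fst)
instance (catch_bp_assoc_history : List (Int × List (Int × Int))) (ball_order : List Int) : Decidable (Pre_format_writing catch_bp_assoc_history ball_order) := by unfold Pre_format_writing; infer_instance

def pvWitness_format_writing : (List (Int × List (Int × Int))) × List Int :=
  ([(1, [(0, 2), (3, 4)]), (5, [(3, 7)])], [5, 1])

def Spec_format_writing (catch_bp_assoc_history : List (Int × List (Int × Int))) (ball_order : List Int) (out : List (List Int)) : Prop := out = format_writing_alt catch_bp_assoc_history ball_order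
instance (catch_bp_assoc_history : List (Int × List (Int × Int))) (ball_order : List Int) (out : List (List Int)) : Decidable (Spec_format_writing catch_bp_assoc_history ball_order out) := by unfold Spec_format_writing; infer_instance

-- ===== CLAIM (what is proved, stated in full; the proofs are below) =====
def Claim_equal_format_writing : Prop := ∀ (catch_bp_assoc_history : List (Int × List (Int × Int))) (ball_order : List Int), Dom_format_writing catch_bp_assoc_history ball_order → Pre_format_writing catch_bp_assoc_history ball_order → Spec_format_writing catch_bp_assoc_history ball_order (format_writing catch_bp_assoc_history ball_order)

-- ===== LEMMAS AND PROOFS =====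

-- abbreviations for A's intermediate data (proof-side only)
def fwRecs (h : List (Int × List (Int × Int))) : List (Int × Int × Int) :=
  h.flatMap (fun p => p.2.map (fun q => (q.1, p.1, q.2)))
def fwSRecs (h : List (Int × List (Int × Int))) : List (Int × Int × Int) :=
  PySem.List.sorted (fwRecs h) (fun r => r.1) false
def fwSeed (h : List (Int × List (Int × Int))) : PySem.Dict Int Int :=
  h.foldl (fun d p => d.insert p.1 (match p.2 with | [] => 0 | q :: _ => q.2)) PySem.Dict.empty
-- the association dict after applying every record with time ≤ t
def fwSnap (d : PySem.Dict Int Int) (xs : List (Int × Int × Int)) (t : Int) : PySem.Dict Int Int :=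
  (xs.filter (fun r => decide (r.1 ≤ t))).foldl (fun d r => d.insert r.2.1 r.2.2) d
-- B's per-cell value, named for the proofs
def fwAltVal (h : List (Int × List (Int × Int))) (t b : Int) : Int :=
  let pairs := PySem.Dict.getD (PySem.Dict.mk h) b []
  match fwBest t pairs with
  | some q => q.2
  | none => match pairs with | q :: _ => q.2 | [] => 0

-- A's single loop with two accumulators is the pair of its two builds
theorem fw_build_eq (h : List (Int × List (Int × Int))) :
    h.foldl
      (fun (st : List (Int × Int × Int) × PySem.Dict Int Int) p =>
        (p.2.foldl (fun recs q => recs ++ [(q.1, p.1, q.2)]) st.1,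
         st.2.insert p.1 (match p.2 with | [] => 0 | q :: _ => q.2)))
      ([], PySem.Dict.empty)
    = (fwRecs h, fwSeed h) := by
  rw [PySem.List.foldl_prod_mk
      (f := fun recs (p : Int × List (Int × Int)) =>
        p.2.foldl (fun recs q => recs ++ [(q.1, p.1, q.2)]) recs)
      (g := fun (d : PySem.Dict Int Int) (p : Int × List (Int × Int)) =>
        d.insert p.1 (match p.2 with | [] => 0 | q :: _ => q.2))]
  unfold fwRecs fwSeed
  congr 1
  have h1 : (fun (recs : List (Int × Int × Int)) (p : Int × List (Int × Int)) =>
      p.2.foldl (fun recs q => recs ++ [(q.1, p.1, q.2)]) recs)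
      = fun recs p => recs ++ p.2.map (fun q => (q.1, p.1, q.2)) := by
    funext recs p
    exact PySem.List.foldl_append_singleton_eq_map _ _ _
  rw [h1, PySem.List.foldl_append_eq_flatMap]
  simp

-- run-grouping reformulation of A's loop (proof-side)
def fwRun (t : Int) (d : PySem.Dict Int Int) : List (Int × Int × Int) → PySem.Dict Int Int × List (Int × Int × Int)
  | [] => (d, [])
  | r :: rest => if r.1 == t then fwRun t (d.insert r.2.1 r.2.2) rest else (d, r :: rest)

theorem fwRun_length_le (t : Int) (d : PySem.Dict Int Int) (xs : List (Int × Int × Int)) :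
    (fwRun t d xs).2.length ≤ xs.length := by
  induction xs generalizing d with
  | nil => simp [fwRun]
  | cons r rest ih =>
    simp only [fwRun]
    split
    · exact le_trans (ih _) (Nat.le_succ _)
    · exact Nat.le_refl _

def fwLoopB (bo : List Int) (d : PySem.Dict Int Int) : List (Int × Int × Int) → List (List Int)
  | [] => []
  | r :: rest =>
    let s := fwRun r.1 (d.insert r.2.1 r.2.2) rest
    ([r.1] ++ bo.map (fun b => s.1.getD b 0)) :: fwLoopB bo s.1 s.2
  termination_by xs => xs.length
  decreasing_by
    simpa using Nat.lt_succ_of_le (fwRun_length_le r.1 (d.insert r.2.1 r.2.2) rest)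

-- on a time-sorted record list the lookahead emit and the run-grouping emit agree
theorem fwLoop_eq (bo : List Int) (xs : List (Int × Int × Int))
    (hs : xs.Pairwise (fun a b => a.1 ≤ b.1)) (d : PySem.Dict Int Int) :
    fwLoopA bo d xs = fwLoopB bo d xs := by
  induction xs generalizing d with
  | nil => simp [fwLoopA, fwLoopB]
  | cons r rest ih =>
    match rest, hs with
    | [], _ => simp [fwLoopA, fwLoopB, fwRun]
    | r2 :: rest2, hs =>
      have hle : r.1 ≤ r2.1 := (List.pairwise_cons.1 hs).1 _ (List.mem_cons_self)
      have htail := (List.pairwise_cons.1 hs).2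
      by_cases heq : r2.1 = r.1
      · have hA : fwLoopA bo d (r :: r2 :: rest2)
            = fwLoopA bo (d.insert r.2.1 r.2.2) (r2 :: rest2) := by
          simp [fwLoopA, heq]
        have hB : fwLoopB bo d (r :: r2 :: rest2)
            = fwLoopB bo (d.insert r.2.1 r.2.2) (r2 :: rest2) := by
          simp [fwLoopB, fwRun, heq]
        rw [hA, hB]
        exact ih htail _
      · have hlt : r.1 < r2.1 := lt_of_le_of_ne hle (fun e => heq e.symm)
        have hrun : fwRun r.1 (d.insert r.2.1 r.2.2) (r2 :: rest2)
            = (d.insert r.2.1 r.2.2, r2 :: rest2) := by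
          simp [fwRun, heq]
        have hA : fwLoopA bo d (r :: r2 :: rest2)
            = ([r.1] ++ bo.map (fun b => (d.insert r.2.1 r.2.2).getD b 0))
              :: fwLoopA bo (d.insert r.2.1 r.2.2) (r2 :: rest2) := by
          simp only [fwLoopA, hlt, decide_true, if_true]
          rfl
        have hB : fwLoopB bo d (r :: r2 :: rest2)
            = ([r.1] ++ bo.map (fun b => (d.insert r.2.1 r.2.2).getD b 0))
              :: fwLoopB bo (d.insert r.2.1 r.2.2) (r2 :: rest2) := by
          conv_lhs => rw [fwLoopB]
          rw [hrun]
        rw [hA, hB, ih htail]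

-- fwRun = (apply the head run, keep the remainder)
theorem fwRun_eq (t : Int) (d : PySem.Dict Int Int) (ys : List (Int × Int × Int)) :
    fwRun t d ys
    = ((ys.takeWhile (fun y => y.1 == t)).foldl (fun d r => d.insert r.2.1 r.2.2) d,
       ys.dropWhile (fun y => y.1 == t)) := by
  induction ys generalizing d with
  | nil => simp [fwRun]
  | cons y ys ih =>
    by_cases hy : y.1 = t
    · simp [fwRun, hy, ih]
    · simp [fwRun, hy]

-- dedup of a constant run followed by t-free elements
theorem fw_foldl_add_const (t : Int) (l : List Int) (hl : ∀ a ∈ l, a = t) :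
    l.foldl PySem.Set.add [t] = [t] := by
  induction l with
  | nil => rfl
  | cons x l ih =>
    have hx := hl x List.mem_cons_self
    subst hx
    have : PySem.Set.add [x] x = [x] := by simp [PySem.Set.add, PySem.Set.contains]
    simp only [List.foldl_cons, this]
    exact ih (fun a ha => hl a (List.mem_cons_of_mem _ ha))

theorem fw_foldl_add_cons (t : Int) (s : List Int) (l : List Int) (hl : ∀ a ∈ l, a ≠ t) :
    l.foldl PySem.Set.add (t :: s) = t :: l.foldl PySem.Set.add s := by
  induction l generalizing s with
  | nil => rfl
  | cons x l ih =>
    have hx := hl x List.mem_cons_self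
    have hc : PySem.Set.contains (t :: s) x = PySem.Set.contains s x := by
      simp [PySem.Set.contains, hx]
    have : PySem.Set.add (t :: s) x = t :: PySem.Set.add s x := by
      simp only [PySem.Set.add, hc]
      split <;> simp
    simp only [List.foldl_cons, this]
    exact ih _ (fun a ha => hl a (List.mem_cons_of_mem _ ha))

theorem fw_dedup_run (t : Int) (l1 l2 : List Int)
    (h1 : ∀ a ∈ l1, a = t) (h2 : ∀ a ∈ l2, a ≠ t) :
    PySem.List.dedup (t :: (l1 ++ l2)) = t :: PySem.List.dedup l2 := by
  simp only [PySem.List.dedup, PySem.Set.ofList, List.foldl_cons, List.foldl_append]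
  have hadd : PySem.Set.add PySem.Set.empty t = [t] := rfl
  rw [hadd, fw_foldl_add_const t l1 h1, fw_foldl_add_cons t [] l2 h2]
  rfl

-- PySem.Set.ofList is a sublist (keeps first occurrences in order)
theorem fw_foldl_add_sublist {l r s : List Int} (h : s.Sublist r) :
    (l.foldl PySem.Set.add s).Sublist (r ++ l) := by
  induction l generalizing s r with
  | nil => simpa using h
  | cons x l ih =>
    have hstep : (PySem.Set.add s x).Sublist (r ++ [x]) := by
      unfold PySem.Set.add
      split
      · exact h.trans (List.sublist_append_left r [x])
      · exact h.append (List.Sublist.refl [x])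
    simpa [List.append_assoc] using ih hstep

theorem fw_ofList_sublist (l : List Int) : (PySem.Set.ofList l).Sublist l := by
  simpa using fw_foldl_add_sublist (l := l) (r := []) (s := []) (List.Sublist.refl [])

-- ===== run-grouping loop = one row per distinct time, dict = all records with time ≤ t =====
theorem fw_runspec (bo : List Int) (n : Nat) :
    ∀ (xs : List (Int × Int × Int)), xs.length ≤ n →
      xs.Pairwise (fun a b => a.1 ≤ b.1) → ∀ d,
      fwLoopB bo d xs
      = (PySem.List.dedup (xs.map (fun r => r.1))).map
          (fun t => t :: bo.map (fun b => (fwSnap d xs t).getD b 0)) := by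
  induction n with
  | zero =>
    intro xs hlen _ d
    have : xs = [] := List.eq_nil_of_length_eq_zero (Nat.le_zero.1 hlen)
    subst this
    simp [fwLoopB, PySem.List.dedup, PySem.Set.ofList]
  | succ n ih =>
    intro xs hlen hs d
    match xs, hs with
    | [], _ => simp [fwLoopB, PySem.List.dedup, PySem.Set.ofList]
    | r :: rest, hs =>
      have hall : ∀ y ∈ rest, r.1 ≤ y.1 := (List.pairwise_cons.1 hs).1
      have hrest : rest.Pairwise (fun a b => a.1 ≤ b.1) := (List.pairwise_cons.1 hs).2
      set run := rest.takeWhile (fun y => y.1 == r.1) with hrun_def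
      set rest' := rest.dropWhile (fun y => y.1 == r.1) with hrest'_def
      have hsplit : run ++ rest' = rest := List.takeWhile_append_dropWhile
      -- every element of the run has time r.1
      have hrun_t : ∀ y ∈ run, y.1 = r.1 := by
        intro y hy
        have := List.mem_takeWhile_imp hy
        simpa using this
      -- every element of the remainder has time > r.1
      have hrest'_t : ∀ y ∈ rest', r.1 < y.1 := by
        intro y hy
        match hr' : rest', hy with
        | z :: zs, hy =>
          have hz_mem : z ∈ rest := by
            have : z ∈ rest' := by rw [hr']; exact List.mem_cons_self
            have hsub : rest'.Sublist rest := List.dropWhile_sublist _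
            exact hsub.mem this
          have hzne : (z.1 == r.1) = false := by
            have := List.head?_dropWhile_not (fun y => y.1 == r.1) rest
            rw [← hrest'_def] at this
            simpa using this
          have hzlt : r.1 < z.1 :=
            lt_of_le_of_ne (hall z hz_mem) (fun e => by simp [e] at hzne)
          have hpw' : (z :: zs).Pairwise (fun a b => a.1 ≤ b.1) := by
            rw [hrest'_def]; exact hrest.sublist (List.dropWhile_sublist _)
          rcases List.mem_cons.1 hy with rfl | hyzs
          · exact hzlt
          · exact lt_of_lt_of_le hzlt ((List.pairwise_cons.1 hpw').1 y hyzs)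
      -- unfold one step of fwLoopB
      have hstep : fwLoopB bo d (r :: rest)
          = ([r.1] ++ bo.map (fun b => ((r :: run).foldl (fun d r => d.insert r.2.1 r.2.2) d).getD b 0))
            :: fwLoopB bo ((r :: run).foldl (fun d r => d.insert r.2.1 r.2.2) d) rest' := by
        conv_lhs => rw [fwLoopB]
        rw [fwRun_eq]
        rfl
      -- the head dict is the snapshot at time r.1
      have hfilter_head : (r :: rest).filter (fun x => decide (x.1 ≤ r.1)) = r :: run := by
        rw [← hsplit]
        simp only [List.filter_cons, List.filter_append, decide_eq_true_eq, le_refl, if_true]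
        congr 1
        rw [List.filter_eq_self.2 (fun y hy => by simp [hrun_t y hy]),
            List.filter_eq_nil_iff.2 (fun y hy => by simp [not_le.2 (hrest'_t y hy)]),
            List.append_nil]
      -- dedup of the times
      have hdedup : PySem.List.dedup ((r :: rest).map (fun x => x.1))
          = r.1 :: PySem.List.dedup (rest'.map (fun x => x.1)) := by
        rw [← hsplit]
        simp only [List.map_cons, List.map_append]
        exact fw_dedup_run r.1 _ _
          (by intro a ha; rcases List.mem_map.1 ha with ⟨y, hy, rfl⟩; exact hrun_t y hy)
          (by intro a ha; rcases List.mem_map.1 ha with ⟨y, hy, rfl⟩;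
              exact ne_of_gt (hrest'_t y hy))
      -- snapshots at later times factor through the head run
      have hsnap : ∀ t', r.1 < t' →
          fwSnap d (r :: rest) t'
          = fwSnap ((r :: run).foldl (fun d r => d.insert r.2.1 r.2.2) d) rest' t' := by
        intro t' ht'
        unfold fwSnap
        rw [← hsplit]
        simp only [List.filter_cons, List.filter_append, decide_eq_true_eq,
          le_of_lt ht', if_true]
        rw [List.filter_eq_self.2 (fun y hy => by simp [hrun_t y hy, le_of_lt ht'])]
        simp [List.foldl_append]
      have hlen' : rest'.length ≤ n := by
        have h1 : rest'.length ≤ rest.length := (List.dropWhile_sublist _).length_le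
        have h2 : rest.length + 1 ≤ n + 1 := by simpa using hlen
        omega
      have hpw' : rest'.Pairwise (fun a b => a.1 ≤ b.1) :=
        hrest.sublist (List.dropWhile_sublist _)
      rw [hstep, ih rest' hlen' hpw' _, hdedup]
      simp only [List.map_cons]
      congr 1
      · rw [List.singleton_append]
        unfold fwSnap
        rw [hfilter_head]
      · apply List.map_congr_left
        intro t' ht'
        have ht'mem : t' ∈ rest'.map (fun x => x.1) := by
          have := (PySem.List.mem_dedup _ _).1 ht'
          simpa using this
        rcases List.mem_map.1 ht'mem with ⟨y, hy, rfl⟩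
        rw [hsnap y.1 (hrest'_t y hy)]

-- ===== the dict built by inserts, looked up at one key =====
theorem fw_fold_get? (l : List (Int × Int × Int)) (b : Int) :
    ∀ d : PySem.Dict Int Int,
    (l.foldl (fun d r => d.insert r.2.1 r.2.2) d).get? b
    = l.foldl (fun o r => if r.2.1 = b then some r.2.2 else o) (d.get? b) := by
  induction l with
  | nil => intro d; rfl
  | cons r l ih =>
    intro d
    simp only [List.foldl_cons, ih]
    congr 1
    rw [PySem.Dict.get?_insert]
    by_cases hb : r.2.1 = b
    · simp [hb]
    · rw [if_neg (fun e => hb e.symm), if_neg hb]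

theorem fw_foldl_some (l : List (Int × Int × Int)) :
    ∀ init : Option Int,
    l.foldl (fun _ r => some r.2.2) init
    = match l.getLast? with | some r => some r.2.2 | none => init := by
  induction l with
  | nil => intro init; rfl
  | cons x l ih =>
    intro init
    simp only [List.foldl_cons]
    cases l with
    | nil => rfl
    | cons y l' =>
      rw [ih, List.getLast?_cons_cons]
      cases hz : (y :: l').getLast? with
      | none => simp at hz
      | some z => rfl

-- the seed dict looked up at one key is the first matching entry's first pid
theorem fw_seed_get? (b : Int) :
    ∀ (h : List (Int × List (Int × Int))) (d : PySem.Dict Int Int),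
    (h.map Prod.fst).Nodup →
    (h.foldl (fun d p => d.insert p.1 (match p.2 with | [] => 0 | q :: _ => q.2)) d).get? b
    = match h.find? (fun p => decide (p.1 = b)) with
      | some p => some (match p.2 with | [] => 0 | q :: _ => q.2)
      | none => d.get? b := by
  intro h
  induction h with
  | nil => intro d _; rfl
  | cons p h ih =>
    intro d hnd
    have hnd' : (h.map Prod.fst).Nodup := (List.nodup_cons.1 hnd).2
    simp only [List.foldl_cons, ih _ hnd']
    by_cases hpb : p.1 = b
    · have hnone : h.find? (fun p => decide (p.1 = b)) = none := by
        rw [List.find?_eq_none]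
        intro x hx hdec
        have hxb : x.1 = b := by simpa using hdec
        exact (List.nodup_cons.1 hnd).1 (by
          rw [hpb, ← hxb]; exact List.mem_map_of_mem hx)
      rw [hnone]
      simp [hpb]
    · rw [List.find?_cons]
      have hdec : (decide (p.1 = b)) = false := decide_eq_false hpb
      rw [hdec]
      cases hfind : h.find? (fun p => decide (p.1 = b)) with
      | some q => rfl
      | none =>
        show (d.insert p.1 _).get? b = d.get? b
        rw [PySem.Dict.get?_insert, if_neg (fun e => hpb e.symm)]

-- records of one ball = that ball's own pair list, embedded
theorem fw_recs_filter (b : Int) :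
    ∀ (h : List (Int × List (Int × Int))), (h.map Prod.fst).Nodup →
    (fwRecs h).filter (fun r => decide (r.2.1 = b))
    = match h.find? (fun p => decide (p.1 = b)) with
      | some p => p.2.map (fun q => (q.1, b, q.2))
      | none => [] := by
  intro h
  induction h with
  | nil => intro _; rfl
  | cons p h ih =>
    intro hnd
    have hnd' : (h.map Prod.fst).Nodup := (List.nodup_cons.1 hnd).2
    unfold fwRecs
    rw [List.flatMap_cons, List.filter_append]
    have hmap : (p.2.map (fun q => (q.1, p.1, q.2))).filter (fun r => decide (r.2.1 = b))
        = if p.1 = b then p.2.map (fun q => (q.1, b, q.2)) else [] := by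
      rw [List.filter_map]
      by_cases hpb : p.1 = b
      · subst hpb
        simp [Function.comp_def]
      · simp [Function.comp_def, hpb]
    by_cases hpb : p.1 = b
    · have hnone : (fwRecs h).filter (fun r => decide (r.2.1 = b)) = [] := by
        rw [List.filter_eq_nil_iff]
        intro r hr
        rcases List.mem_flatMap.1 hr with ⟨p', hp', hrp'⟩
        rcases List.mem_map.1 hrp' with ⟨q, _, rfl⟩
        simp only [decide_eq_true_eq]
        intro he
        exact (List.nodup_cons.1 hnd).1 (by
          rw [hpb, ← he]; exact List.mem_map_of_mem hp')
      have := hnone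
      unfold fwRecs at this
      rw [hmap, if_pos hpb, this, List.append_nil, List.find?_cons]
      simp [hpb]
    · have := ih hnd'
      unfold fwRecs at this
      rw [hmap, if_neg hpb, List.nil_append, this, List.find?_cons]
      simp [hpb]

-- ===== stability of PySem's insertion sort under filtering =====
theorem fw_insertBy_filter {α : Type} (key : α → Int) (p : α → Bool) (x : α) :
    ∀ (s : List α), s.Pairwise (fun a b => key a ≤ key b) →
    (PySem.List.insertBy (fun a b => decide (key a < key b)) x s).filter p
    = if p x then PySem.List.insertBy (fun a b => decide (key a < key b)) x (s.filter p)
      else s.filter p := by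
  intro s
  induction s with
  | nil =>
    intro _
    by_cases hpx : p x <;> simp [PySem.List.insertBy, hpx]
  | cons y ys ih =>
    intro hs
    have hy : ∀ z ∈ ys, key y ≤ key z := (List.pairwise_cons.1 hs).1
    have hys : ys.Pairwise (fun a b => key a ≤ key b) := (List.pairwise_cons.1 hs).2
    by_cases hxy : key x < key y
    · -- x goes in front
      have hins : PySem.List.insertBy (fun a b => decide (key a < key b)) x (y :: ys)
          = x :: y :: ys := by simp [PySem.List.insertBy, hxy]
      rw [hins]
      by_cases hpx : p x
      · -- head of the filtered tail still has key > key x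
        have hfront : PySem.List.insertBy (fun a b => decide (key a < key b)) x ((y :: ys).filter p)
            = x :: (y :: ys).filter p := by
          cases hf : (y :: ys).filter p with
          | nil => simp [PySem.List.insertBy]
          | cons z zs =>
            have hz : z ∈ (y :: ys) := List.mem_of_mem_filter (hf ▸ List.mem_cons_self)
            have hkz : key x < key z := by
              rcases List.mem_cons.1 hz with rfl | hzys
              · exact hxy
              · exact lt_of_lt_of_le hxy (hy z hzys)
            simp [PySem.List.insertBy, hkz]
        rw [if_pos hpx, hfront]
        simp [List.filter_cons, hpx]
      · rw [if_neg hpx]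
        simp [List.filter_cons, hpx]
    · -- x is inserted in the tail
      have hins : PySem.List.insertBy (fun a b => decide (key a < key b)) x (y :: ys)
          = y :: PySem.List.insertBy (fun a b => decide (key a < key b)) x ys := by
        simp [PySem.List.insertBy, hxy]
      rw [hins]
      by_cases hpy : p y
      · simp only [List.filter_cons, hpy, if_true, ih hys]
        by_cases hpx : p x
        · rw [if_pos hpx, if_pos hpx]
          have : PySem.List.insertBy (fun a b => decide (key a < key b)) x (y :: ys.filter p)
              = y :: PySem.List.insertBy (fun a b => decide (key a < key b)) x (ys.filter p) := by
            simp [PySem.List.insertBy, hxy]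
          simp only [hpy] at *
          rw [this]
        · simp [hpx]
      · simp only [List.filter_cons, hpy, ih hys]
        by_cases hpx : p x <;> simp [hpx]

theorem fw_sorted_append_single {α : Type} (key : α → Int) (l : List α) (x : α) :
    PySem.List.sorted (l ++ [x]) key false
    = PySem.List.insertBy (fun a b => decide (key a < key b)) x (PySem.List.sorted l key false) := by
  rw [PySem.List.sorted_eq_foldl_insertBy, PySem.List.sorted_eq_foldl_insertBy, List.foldl_append]
  rfl

theorem fw_sorted_filter {α : Type} (key : α → Int) (p : α → Bool) (l : List α) :
    (PySem.List.sorted l key false).filter p = PySem.List.sorted (l.filter p) key false := by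
  induction l using List.reverseRecOn with
  | nil => rfl
  | append_singleton l x ih =>
    rw [fw_sorted_append_single, fw_insertBy_filter key p x _ (PySem.List.sorted_pairwise l key),
        List.filter_append]
    by_cases hpx : p x
    · rw [if_pos hpx]
      simp only [List.filter_cons, hpx, if_true, List.filter_nil]
      rw [fw_sorted_append_single, ih]
    · rw [if_neg hpx]
      simp only [List.filter_cons, hpx, Bool.false_eq_true, if_false, List.filter_nil,
        List.append_nil]
      exact ih

-- sorting commutes with the key-preserving embedding of one ball's pairs
theorem fw_insertBy_map (b : Int) (x : Int × Int) :
    ∀ (s : List (Int × Int)),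
    PySem.List.insertBy (fun a c => decide (a.1 < c.1)) (x.1, b, x.2)
      (s.map (fun q => (q.1, b, q.2)))
    = (PySem.List.insertBy (fun a c => decide (a.1 < c.1)) x s).map (fun q => (q.1, b, q.2)) := by
  intro s
  induction s with
  | nil => rfl
  | cons y ys ih =>
    by_cases hxy : x.1 < y.1
    · simp [PySem.List.insertBy, hxy]
    · simp [PySem.List.insertBy, hxy, ih]

theorem fw_sorted_map (b : Int) (l : List (Int × Int)) :
    PySem.List.sorted (l.map (fun q => (q.1, b, q.2))) (fun r => r.1) false
    = (PySem.List.sorted l (fun q => q.1) false).map (fun q => (q.1, b, q.2)) := by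
  rw [PySem.List.sorted_eq_foldl_insertBy, PySem.List.sorted_eq_foldl_insertBy]
  have aux : ∀ (l : List (Int × Int)) (acc : List (Int × Int)),
      (l.map (fun q => (q.1, b, q.2))).foldl
        (fun a x => PySem.List.insertBy (fun r s => decide (r.1 < s.1)) x a)
        (acc.map (fun q => (q.1, b, q.2)))
      = (l.foldl (fun a x => PySem.List.insertBy (fun r s => decide (r.1 < s.1)) x a) acc).map
          (fun q => (q.1, b, q.2)) := by
    intro l
    induction l with
    | nil => intro acc; rfl
    | cons x l ih =>
      intro acc
      simp only [List.map_cons, List.foldl_cons]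
      rw [fw_insertBy_map b x acc, ih]
  simpa using aux l []

-- last element of the sorted list = left-to-right arg-max (ties to the later element)
theorem fw_insertBy_getLast? (x : Int × Int) :
    ∀ (s : List (Int × Int)), s.Pairwise (fun a b => a.1 ≤ b.1) →
    (PySem.List.insertBy (fun a b => decide (a.1 < b.1)) x s).getLast?
    = match s.getLast? with
      | none => some x
      | some z => if z.1 ≤ x.1 then some x else some z := by
  intro s
  induction s with
  | nil => intro _; rfl
  | cons y ys ih =>
    intro hs
    have hy : ∀ z ∈ ys, y.1 ≤ z.1 := (List.pairwise_cons.1 hs).1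
    have hys : ys.Pairwise (fun a b => a.1 ≤ b.1) := (List.pairwise_cons.1 hs).2
    by_cases hxy : x.1 < y.1
    · have hins : PySem.List.insertBy (fun a b => decide (a.1 < b.1)) x (y :: ys)
          = x :: y :: ys := by simp [PySem.List.insertBy, hxy]
      rw [hins, List.getLast?_cons_cons]
      cases hlast : (y :: ys).getLast? with
      | none => simp at hlast
      | some z =>
        have hz : z ∈ y :: ys := List.mem_of_getLast? hlast
        have hyz : y.1 ≤ z.1 := by
          rcases List.mem_cons.1 hz with rfl | hzys
          · exact le_refl _
          · exact hy z hzys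
        have : ¬ z.1 ≤ x.1 := not_le.2 (lt_of_lt_of_le hxy hyz)
        simp [this]
    · have hins : PySem.List.insertBy (fun a b => decide (a.1 < b.1)) x (y :: ys)
          = y :: PySem.List.insertBy (fun a b => decide (a.1 < b.1)) x ys := by
        simp [PySem.List.insertBy, hxy]
      rw [hins]
      cases ys with
      | nil =>
        have : PySem.List.insertBy (fun a b => decide (a.1 < b.1)) x [] = [x] := rfl
        rw [this, List.getLast?_cons_cons]
        simp [not_lt.1 hxy]
      | cons w ws =>
        have hne : PySem.List.insertBy (fun a b => decide (a.1 < b.1)) x (w :: ws) ≠ [] := by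
          simp only [PySem.List.insertBy]
          split <;> simp
        cases hi : PySem.List.insertBy (fun a b => decide (a.1 < b.1)) x (w :: ws) with
        | nil => exact absurd hi hne
        | cons u us =>
          rw [List.getLast?_cons_cons, ← hi, ih hys, List.getLast?_cons_cons]

def fwAStep (best : Option (Int × Int)) (q : Int × Int) : Option (Int × Int) :=
  if (match best with | none => true | some bq => decide (bq.1 ≤ q.1)) = true then some q else best

theorem fw_sorted_getLast?_argmax (m : List (Int × Int)) :
    (PySem.List.sorted m (fun q => q.1) false).getLast? = m.foldl fwAStep none := by
  induction m using List.reverseRecOn with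
  | nil => rfl
  | append_singleton m x ih =>
    rw [fw_sorted_append_single,
        fw_insertBy_getLast? x _ (PySem.List.sorted_pairwise m (fun q => q.1)),
        List.foldl_append, List.foldl_cons, List.foldl_nil, ih]
    cases hlast : m.foldl fwAStep none with
    | none => simp [fwAStep]
    | some z =>
      by_cases hz : z.1 ≤ x.1 <;> simp [fwAStep, hz]

-- B's scan over the raw pair list = arg-max over the time-filtered pair list
theorem fw_fwBest_filter (t : Int) (l : List (Int × Int)) :
    fwBest t l = (l.filter (fun q => decide (q.1 ≤ t))).foldl fwAStep none := by
  unfold fwBest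
  rw [← PySem.List.foldl_if_eq_foldl_filter (p := fun q => decide (q.1 ≤ t)) (f := fwAStep)]
  apply PySem.List.foldl_congr_mem
  intro best q _
  by_cases hq : q.1 ≤ t <;> simp [fwAStep, hq]

-- ===== the per-cell value of the two programs agrees =====
theorem fw_val (h : List (Int × List (Int × Int))) (hnd : (h.map Prod.fst).Nodup)
    (t b : Int) :
    (fwSnap (fwSeed h) (fwSRecs h) t).getD b 0 = fwAltVal h t b := by
  have hbeq : (fun p : Int × List (Int × Int) => p.1 == b) = (fun p => decide (p.1 = b)) := by
    funext p
    by_cases hp : p.1 = b <;> simp [hp]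
  -- the filtered, ball-restricted record list
  have hLb :
      ((fwSRecs h).filter (fun r => decide (r.1 ≤ t))).filter (fun r => decide (r.2.1 = b))
      = match h.find? (fun p => decide (p.1 = b)) with
        | some p => ((PySem.List.sorted p.2 (fun q => q.1) false).filter
            (fun q => decide (q.1 ≤ t))).map (fun q => (q.1, b, q.2))
        | none => [] := by
    rw [List.filter_filter, List.filter_congr (l := fwSRecs h)
        (q := fun r => decide (r.1 ≤ t) && decide (r.2.1 = b))
        (fun r _ => by by_cases h1 : r.2.1 = b <;> by_cases h2 : r.1 ≤ t <;> simp [h1, h2]),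
        ← List.filter_filter]
    unfold fwSRecs
    rw [fw_sorted_filter (fun r => r.1) (fun r => decide (r.2.1 = b)) (fwRecs h),
        fw_recs_filter b h hnd]
    cases hf : h.find? (fun p => decide (p.1 = b)) with
    | none => rfl
    | some p =>
      rw [fw_sorted_map, List.filter_map]
      congr 1
  -- compute the dict lookup
  unfold fwSnap
  rw [PySem.Dict.getD_eq_get?_getD, fw_fold_get?]
  simp only [PySem.List.foldl_ite_eq_foldl_filter (p := fun r : Int × Int × Int => r.2.1 = b)
      (f := fun (o : Option Int) r => some r.2.2)]
  rw [show ((fwSRecs h).filter fun r => decide (r.1 ≤ t)).filter (fun r => decide (r.2.1 = b))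
      = _ from hLb]
  unfold fwSeed at *
  rw [fw_seed_get? b h PySem.Dict.empty hnd]
  unfold fwAltVal
  have hpairs : PySem.Dict.getD (PySem.Dict.mk h) b []
      = match h.find? (fun p => decide (p.1 = b)) with
        | some p => p.2
        | none => [] := by
    rw [PySem.Dict.getD_eq_get?_getD]
    show (Option.map (fun x => x.2) (List.find? (fun p => p.1 == b) h)).getD [] = _
    rw [hbeq]
    cases hf : h.find? (fun p => decide (p.1 = b)) <;> simp
  rw [hpairs]
  cases hf : h.find? (fun p => decide (p.1 = b)) with
  | none =>
    simp [fwBest, PySem.Dict.get?_empty]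
  | some p =>
    rw [fw_foldl_some, List.getLast?_map,
        fw_sorted_filter (fun q => q.1) (fun q => decide (q.1 ≤ t)) p.2,
        fw_sorted_getLast?_argmax, ← fw_fwBest_filter]
    cases hbest : fwBest t p.2 with
    | none => cases hp2 : p.2 <;> rw [hp2] at hbest <;> simp [hbest, hp2]
    | some q => simp [hbest]

-- ===== the list of distinct times =====
theorem fw_times_eq (h : List (Int × List (Int × Int))) :
    PySem.List.sorted (PySem.Set.ofList (h.flatMap (fun p => p.2.map (fun q => q.1))))
      (fun x => x) false
    = PySem.List.dedup ((fwSRecs h).map (fun r => r.1)) := by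
  have hT : (fwRecs h).map (fun r => r.1) = h.flatMap (fun p => p.2.map (fun q => q.1)) := by
    unfold fwRecs
    rw [List.map_flatMap]
    simp [List.map_map, Function.comp_def]
  apply PySem.List.sorted_eq_of_perm_of_pairwise_lt
  · -- same distinct elements
    rw [List.perm_ext_iff_of_nodup (PySem.List.nodup_dedup _) (PySem.Set.nodup_ofList _)]
    intro a
    rw [PySem.List.mem_dedup, PySem.Set.mem_ofList, ← hT]
    constructor
    · intro ha
      rcases List.mem_map.1 ha with ⟨r, hr, rfl⟩
      exact List.mem_map_of_mem ((PySem.List.mem_sorted _ _ _ _).1 hr)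
    · intro ha
      rcases List.mem_map.1 ha with ⟨r, hr, rfl⟩
      exact List.mem_map_of_mem ((PySem.List.mem_sorted _ _ _ _).2 hr)
  · -- strictly increasing
    have hsub : (PySem.List.dedup ((fwSRecs h).map (fun r => r.1))).Sublist
        ((fwSRecs h).map (fun r => r.1)) := by
      rw [PySem.List.dedup_eq_ofList]
      exact fw_ofList_sublist _
    have hle : ((fwSRecs h).map (fun r => r.1)).Pairwise (· ≤ ·) :=
      PySem.List.sorted_map_key_pairwise _ _
    have hle' := hle.sublist hsub
    have hne : (PySem.List.dedup ((fwSRecs h).map (fun r => r.1))).Pairwise (· ≠ ·) :=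
      PySem.List.nodup_dedup _
    exact (hle'.and hne).imp (fun hab => lt_of_le_of_ne hab.1 hab.2)

-- ===== VERDICT (by name: the statement is the Claim_ definition above) =====
theorem format_writing_spec : Claim_equal_format_writing := by
  intro h bo _ hpre
  unfold Spec_format_writing
  have hnd : (h.map Prod.fst).Nodup := hpre.1
  calc format_writing h bo
      = fwLoopA bo (fwSeed h) (fwSRecs h) := by
        unfold format_writing
        rw [fw_build_eq]
        rfl
    _ = fwLoopB bo (fwSeed h) (fwSRecs h) :=
        fwLoop_eq bo _ (PySem.List.sorted_pairwise _ _) _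
    _ = (PySem.List.dedup ((fwSRecs h).map (fun r => r.1))).map
          (fun t => t :: bo.map (fun b => (fwSnap (fwSeed h) (fwSRecs h) t).getD b 0)) :=
        fw_runspec bo (fwSRecs h).length _ (le_refl _) (PySem.List.sorted_pairwise _ _) _
    _ = format_writing_alt h bo := by
        unfold format_writing_alt
        rw [fw_times_eq]
        apply List.map_congr_left
        intro t _
        congr 1
        apply List.map_congr_left
        intro b _
        exact fw_val h hnd t b
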